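-- pv_equiv track=rewrite | github.com/rossm6/dunno-backend | games/anagrams.py | remove_anagrams_with_multiple_solutions
-- ===== SOURCE A (Python) =====
-- def remove_anagrams_with_multiple_solutions(words):
--     words_by_length = {}
--     for word in words:
--         if len(word) in words_by_length:
--             words_by_length[len(word)].append(word)
--         else:
--             words_by_length[len(word)] = [word]
--
--     checked = []
--
--     for word_length, words in words_by_length.items():
--         for word in words:
--             letter_combination_unique = True
--             for _word in words:
--                 if _word != word:
--                     # comparing different words
--                     if set(word) == set(_word):
--                         letter_combination_unique = False
--                         break
--
--             if letter_combination_unique: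
--                 checked.append(word)
--
--     return checked
-- ===== SOURCE B (Python) =====
-- def remove_anagrams_with_multiple_solutions(words):
--     # One pass builds the length groups and a (length, sorted-distinct-letters)
--     # signature table recording, per signature, the first word seen and whether
--     # any DIFFERENT word shares it; a second pass keeps the unmarked words.
--     groups = {}
--     sig_info = {}  # (len, canonical letter-set string) -> (first word, seen a different word?)
--     for word in words:
--         groups.setdefault(len(word), []).append(word)
--         key = (len(word), ''.join(sorted(set(word))))
--         if key not in sig_info:
--             sig_info[key] = (word, False)
--         else:
--             first, multi = sig_info[key]
--             if word != first:
--                 sig_info[key] = (first, True)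
--     out = []
--     for group in groups.values():
--         for word in group:
--             if not sig_info[(len(word), ''.join(sorted(set(word))))][1]:
--                 out.append(word)
--     return out
-- ===== Notes on version B (the rewrite author's own statement) =====
-- stated objective: faster
-- what changed: replaces the per-length-group quadratic all-pairs letter-set comparison with a single pass that hashes each word's (length, sorted distinct letters) signature into a dict marking signatures shared by two different words, then filters each length group by one dict lookup
import Mathlib
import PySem

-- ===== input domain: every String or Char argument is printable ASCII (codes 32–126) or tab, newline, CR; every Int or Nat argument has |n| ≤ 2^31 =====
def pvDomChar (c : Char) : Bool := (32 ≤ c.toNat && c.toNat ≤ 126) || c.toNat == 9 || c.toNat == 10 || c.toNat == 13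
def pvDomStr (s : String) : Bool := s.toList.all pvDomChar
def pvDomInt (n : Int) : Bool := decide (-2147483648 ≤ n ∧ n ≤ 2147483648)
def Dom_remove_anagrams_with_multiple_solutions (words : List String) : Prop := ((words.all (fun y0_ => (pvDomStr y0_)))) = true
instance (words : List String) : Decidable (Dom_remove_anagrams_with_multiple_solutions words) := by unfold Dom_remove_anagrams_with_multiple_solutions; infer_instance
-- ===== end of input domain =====

-- B replaces A's per-length-group quadratic all-pairs letter-set scan by a one-pass
-- (length, sorted-distinct-letters) signature table consulted with one lookup per word (objective: faster).

-- ===== PORT A =====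
-- set(word)
def pvSetOf (w : String) : PySem.Set Char := PySem.Set.ofList w.toList

-- A's inner 'for _word in words' loop computing letter_combination_unique (with break)
def pvUniqueIn (word : String) : List String → Bool
  | [] => true
  | w :: rest =>
    if w ≠ word then
      if PySem.Set.equal (pvSetOf word) (pvSetOf w) then false
      else pvUniqueIn word rest
    else pvUniqueIn word rest

def remove_anagrams_with_multiple_solutions (words : List String) : List String :=
  let words_by_length : PySem.Dict Int (List String) :=
    words.foldl (fun d word =>
      if d.contains (PySem.Str.len word) then
        d.modify (PySem.Str.len word) [] (fun ws => ws ++ [word])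
      else
        d.insert (PySem.Str.len word) [word]) PySem.Dict.empty
  words_by_length.items.foldl (fun checked p =>
    p.2.foldl (fun checked word =>
      if pvUniqueIn word p.2 then checked ++ [word] else checked) checked) []

-- ===== PORT B =====
-- ''.join(sorted(set(word))): sorting the distinct one-char ASCII strings = sorting the Chars by codepoint (exact here)
def pvCanon (w : String) : String :=
  String.ofList (PySem.List.sorted (PySem.Set.ofList w.toList) (fun c => c) false)

-- the dict key (len(word), ''.join(sorted(set(word))))
def pvSig (w : String) : Int × String := (PySem.Str.len w, pvCanon w)

def remove_anagrams_with_multiple_solutions_alt (words : List String) : List String :=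
  let st := words.foldl
    (fun (st : PySem.Dict Int (List String) × PySem.Dict (Int × String) (String × Bool)) word =>
      let groups := st.1.modify (PySem.Str.len word) [] (fun g => g ++ [word])
      let sig_info :=
        match st.2.get? (pvSig word) with
        | none => st.2.insert (pvSig word) (word, false)
        | some fm => if word ≠ fm.1 then st.2.insert (pvSig word) (fm.1, true) else st.2
      (groups, sig_info))
    (PySem.Dict.empty, PySem.Dict.empty)
  st.1.values.foldl (fun out group =>
    group.foldl (fun out word =>
      -- sig_info[key][1]: every grouped word was inserted on the first pass, so the key is present and the default is never read
      if !(st.2.getD (pvSig word) ("", false)).2 then out ++ [word] else out) out) []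

-- ===== PRECONDITION & SPEC =====
def Spec_remove_anagrams_with_multiple_solutions (words : List String) (out : List String) : Prop := out = remove_anagrams_with_multiple_solutions_alt words
instance (words : List String) (out : List String) : Decidable (Spec_remove_anagrams_with_multiple_solutions words out) := by unfold Spec_remove_anagrams_with_multiple_solutions; infer_instance

-- ===== CLAIM (what is proved, stated in full; the proofs are below) =====
def Claim_equal_remove_anagrams_with_multiple_solutions : Prop := ∀ (words : List String), Dom_remove_anagrams_with_multiple_solutions words → Spec_remove_anagrams_with_multiple_solutions words (remove_anagrams_with_multiple_solutions words)

-- ===== LEMMAS AND PROOFS =====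

-- B's single pass over `words` builds the two dicts independently
def pvGroupsOf (words : List String) : PySem.Dict Int (List String) :=
  words.foldl (fun d word => d.modify (PySem.Str.len word) [] (fun g => g ++ [word])) PySem.Dict.empty

def pvSigStep (d : PySem.Dict (Int × String) (String × Bool)) (word : String) :
    PySem.Dict (Int × String) (String × Bool) :=
  match d.get? (pvSig word) with
  | none => d.insert (pvSig word) (word, false)
  | some fm => if word ≠ fm.1 then d.insert (pvSig word) (fm.1, true) else d

def pvSigOf (words : List String) : PySem.Dict (Int × String) (String × Bool) :=
  words.foldl pvSigStep PySem.Dict.empty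

lemma pv_pair_fold (words : List String) g s :
    (words.foldl
      (fun (st : PySem.Dict Int (List String) × PySem.Dict (Int × String) (String × Bool)) word =>
        let groups := st.1.modify (PySem.Str.len word) [] (fun g => g ++ [word])
        let sig_info :=
          match st.2.get? (pvSig word) with
          | none => st.2.insert (pvSig word) (word, false)
          | some fm => if word ≠ fm.1 then st.2.insert (pvSig word) (fm.1, true) else st.2
        (groups, sig_info)) (g, s))
    = (words.foldl (fun d word => d.modify (PySem.Str.len word) [] (fun g => g ++ [word])) g,
       words.foldl pvSigStep s) := by
  induction words generalizing g s with
  | nil => rfl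
  | cons w ws ih => exact ih _ _

-- A's grouping branch IS modify
lemma pv_groups_A (words : List String) :
    words.foldl (fun d word =>
      if d.contains (PySem.Str.len word) then
        d.modify (PySem.Str.len word) [] (fun ws => ws ++ [word])
      else
        d.insert (PySem.Str.len word) [word]) PySem.Dict.empty = pvGroupsOf words := by
  unfold pvGroupsOf
  congr 1
  funext d word
  have hL : PySem.Str.len word = (word.length : Int) := by simp
  rw [hL]
  by_cases h : d.contains ((word.length : Int)) = true
  · simp [h]
  · simp only [Bool.not_eq_true] at h
    simp [h, PySem.Dict.modify, PySem.Dict.getD,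
      (PySem.Dict.get?_eq_none_iff_contains d ((word.length : Int))).2 h]

-- the group of length n, in input order
def pvGrp (words : List String) (n : Int) : List String :=
  words.filter (fun w => PySem.Str.len w == n)

lemma pv_groups_getD (words : List String) (n : Int) :
    (pvGroupsOf words).getD n [] = pvGrp words n := by
  unfold pvGroupsOf pvGrp
  rw [show (words.foldl (fun d word => d.modify (PySem.Str.len word) [] fun g => g ++ [word]) PySem.Dict.empty)
      = ((words.map (fun w => (PySem.Str.len w, w))).foldl
          (fun d p => d.modify p.1 [] fun g => g ++ [p.2]) PySem.Dict.empty)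
      from (List.foldl_map (f := fun w => (PySem.Str.len w, w)) (g := fun (d : PySem.Dict Int (List String)) (p : Int × String) => d.modify p.1 [] fun g => g ++ [p.2])).symm]
  rw [PySem.Dict.getD_foldl_modify_append]
  simp [List.filter_map, Function.comp_def]

lemma pv_groups_keys_nodup (words : List String) :
    (pvGroupsOf words).keys.Nodup := by
  unfold pvGroupsOf
  exact PySem.Dict.nodup_keys_foldl_modify_key words PySem.Str.len []
    (fun _ word => fun g => g ++ [word]) PySem.Dict.empty (by simp [PySem.Dict.empty, PySem.Dict.keys])

-- first-occurrence spec of the signature dict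
def pvSigSpec (k : Int × String) (l : List String) : Option (String × Bool) :=
  match l.filter (fun w => pvSig w == k) with
  | [] => none
  | f :: rest => some (f, rest.any (fun w => w ≠ f))

lemma pv_sig_get? (words : List String) (k : Int × String) :
    (pvSigOf words).get? k = pvSigSpec k words := by
  induction words using List.reverseRecOn generalizing k with
  | nil => simp [pvSigOf, pvSigSpec]
  | append_singleton l w ih =>
    have hstep : pvSigOf (l ++ [w]) = pvSigStep (pvSigOf l) w := by
      simp [pvSigOf, List.foldl_append]
    rw [hstep]
    unfold pvSigStep
    have hspec := ih (pvSig w)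
    by_cases hk : pvSig w = k
    · subst hk
      rcases hfl : List.filter (fun x => pvSig x == pvSig w) l with _ | ⟨f, rest⟩
      · have hnone : (pvSigOf l).get? (pvSig w) = none := by
          rw [hspec]; simp [pvSigSpec, hfl]
        rw [hnone]
        simp [pvSigSpec, List.filter_append, hfl, PySem.Dict.get?_insert_self]
      · have hsome : (pvSigOf l).get? (pvSig w) = some (f, rest.any (fun x => x ≠ f)) := by
          rw [hspec]; simp [pvSigSpec, hfl]
        rw [hsome]
        by_cases hwf : w ≠ f
        · simp only [if_pos hwf]
          rw [PySem.Dict.get?_insert_self]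
          simp [pvSigSpec, List.filter_append, hfl, hwf]
        · simp only [not_not] at hwf
          subst hwf
          simp only [if_neg (by simp : ¬ w ≠ w)]
          rw [hspec]
          simp [pvSigSpec, List.filter_append, hfl]
    · have hflk : List.filter (fun x => pvSig x == k) (l ++ [w]) =
          List.filter (fun x => pvSig x == k) l := by
        simp [List.filter_append, hk]
      rcases hget : (pvSigOf l).get? (pvSig w) with _ | ⟨f, m⟩
      · rw [PySem.Dict.get?_insert_of_ne _ _ (fun h => hk h.symm), ih k]
        simp [pvSigSpec, hflk]
      · by_cases hwf : w ≠ f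
        · simp only [if_pos hwf]
          rw [PySem.Dict.get?_insert_of_ne _ _ (fun h => hk h.symm), ih k]
          simp [pvSigSpec, hflk]
        · simp only [if_neg hwf]
          rw [ih k]
          simp [pvSigSpec, hflk]

lemma pvUniqueIn_eq_all (word : String) (l : List String) :
    pvUniqueIn word l =
      l.all (fun w => w == word || !PySem.Set.equal (pvSetOf word) (pvSetOf w)) := by
  induction l with
  | nil => rfl
  | cons w rest ih =>
    unfold pvUniqueIn
    by_cases h1 : w ≠ word
    · by_cases h2 : PySem.Set.equal (pvSetOf word) (pvSetOf w) = true
      · simp [h1, h2]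
      · simp only [Bool.not_eq_true] at h2
        simp [h1, h2, ih]
    · simp only [not_not] at h1
      simp [h1, ih]

lemma pv_canon_eq_iff (w w' : String) :
    pvCanon w = pvCanon w' ↔ PySem.Set.equal (pvSetOf w) (pvSetOf w') = true := by
  unfold pvCanon pvSetOf
  rw [String.ofList_inj, PySem.Set.equal_iff]
  constructor
  · intro h c
    have p1 := PySem.List.sorted_perm (PySem.Set.ofList w.toList) (fun c => c) false
    have p2 := PySem.List.sorted_perm (PySem.Set.ofList w'.toList) (fun c => c) false
    rw [← p1.mem_iff, h, p2.mem_iff]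
  · intro h
    apply PySem.List.sorted_eq_sorted_of_perm _ _ _ (fun a b hab => hab)
    rw [List.perm_ext_iff_of_nodup (PySem.Set.nodup_ofList _) (PySem.Set.nodup_ofList _)]
    exact h

lemma pv_sig_eq_iff (w w' : String) :
    pvSig w' = pvSig w ↔
      (PySem.Str.len w' = PySem.Str.len w ∧
        PySem.Set.equal (pvSetOf w) (pvSetOf w') = true) := by
  unfold pvSig
  rw [Prod.mk.injEq, ← pv_canon_eq_iff w w']
  constructor
  · rintro ⟨h1, h2⟩; exact ⟨h1, h2.symm⟩
  · rintro ⟨h1, h2⟩; exact ⟨h1, h2.symm⟩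

-- the pointwise agreement of the two keep-conditions on a length group
lemma pv_cond_eq (words : List String) (n : Int) (w : String) (hw : w ∈ pvGrp words n) :
    pvUniqueIn w (pvGrp words n) = !((pvSigOf words).getD (pvSig w) ("", false)).2 := by
  have hw' : w ∈ words ∧ PySem.Str.len w = n := by
    simp only [pvGrp, List.mem_filter] at hw
    exact ⟨hw.1, beq_iff_eq.1 hw.2⟩
  have h := pv_sig_get? words (pvSig w)
  rcases hfl : List.filter (fun x => pvSig x == pvSig w) words with _ | ⟨f, rest⟩
  · exfalso
    have : w ∈ List.filter (fun x => pvSig x == pvSig w) words := by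
      simp [List.mem_filter, hw'.1]
    rw [hfl] at this
    simp at this
  · have hgd : (pvSigOf words).getD (pvSig w) ("", false) = (f, rest.any (fun x => x ≠ f)) := by
      simp [PySem.Dict.getD, h, pvSigSpec, hfl]
    rw [pvUniqueIn_eq_all, hgd]
    -- membership characterisation of the filtered signature class
    have hmemf : ∀ x, x ∈ f :: rest ↔ (x ∈ words ∧ pvSig x = pvSig w) := by
      intro x
      rw [← hfl, List.mem_filter]
      simp
    rw [Bool.eq_iff_iff, List.all_eq_true, Bool.not_eq_true', List.any_eq_false]
    constructor
    · intro hall x hx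
      have hxin : x ∈ words ∧ pvSig x = pvSig w := (hmemf x).1 (List.mem_cons_of_mem _ hx)
      have hsig := (pv_sig_eq_iff w x).1 hxin.2
      have hxg : x ∈ pvGrp words n := by
        simp only [pvGrp, List.mem_filter]
        exact ⟨hxin.1, beq_iff_eq.2 (hsig.1.trans hw'.2)⟩
      have hxw : x = w := by
        by_cases hx1 : x = w
        · exact hx1
        · exfalso; have h2 := hall x hxg; simp [hx1, hsig.2] at h2
      have hfin : f ∈ words ∧ pvSig f = pvSig w := (hmemf f).1 List.mem_cons_self
      have hsigf := (pv_sig_eq_iff w f).1 hfin.2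
      have hfg : f ∈ pvGrp words n := by
        simp only [pvGrp, List.mem_filter]
        exact ⟨hfin.1, beq_iff_eq.2 (hsigf.1.trans hw'.2)⟩
      have hfw : f = w := by
        by_cases hf1 : f = w
        · exact hf1
        · exfalso; have h2 := hall f hfg; simp [hf1, hsigf.2] at h2
      simp [hxw, hfw]
    · intro hrest w' hw'g
      by_cases heq : PySem.Set.equal (pvSetOf w) (pvSetOf w') = true
      · have hw'w : w' ∈ words ∧ PySem.Str.len w' = n := by
          simp only [pvGrp, List.mem_filter] at hw'g
          exact ⟨hw'g.1, beq_iff_eq.1 hw'g.2⟩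
        have hw'sig : pvSig w' = pvSig w := by
          rw [pv_sig_eq_iff]
          exact ⟨hw'w.2.trans hw'.2.symm, heq⟩
        have hallf : ∀ x, x ∈ f :: rest → x = f := by
          intro x hx
          rcases List.mem_cons.1 hx with h1 | h1
          · exact h1
          · have := hrest x h1
            simpa using this
        have hwf : w = f := hallf w ((hmemf w).2 ⟨hw'.1, rfl⟩)
        have hw'f : w' = f := hallf w' ((hmemf w').2 ⟨hw'w.1, hw'sig⟩)
        simp [hw'f, hwf.symm]
      · simp only [Bool.not_eq_true] at heq
        simp [heq]
  

-- ===== VERDICT (by name: the statement is the Claim_ definition above) =====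
theorem remove_anagrams_with_multiple_solutions_spec : Claim_equal_remove_anagrams_with_multiple_solutions := by
  intro words _
  unfold Spec_remove_anagrams_with_multiple_solutions
  simp only [remove_anagrams_with_multiple_solutions, remove_anagrams_with_multiple_solutions_alt]
  rw [pv_groups_A, pv_pair_fold]
  have hinnerA : ∀ (l acc : List String),
      l.foldl (fun checked word => if pvUniqueIn word l then checked ++ [word] else checked) acc
        = acc ++ l.filter (fun word => pvUniqueIn word l) := by
    intro l acc
    rw [PySem.List.foldl_append_if (fun word => pvUniqueIn word l) (fun w => w) l acc]
    simp
  have hinnerB : ∀ (l acc : List String),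
      l.foldl (fun out word =>
        if !((pvSigOf words).getD (pvSig word) ("", false)).2 then out ++ [word] else out) acc
        = acc ++ l.filter (fun word => !((pvSigOf words).getD (pvSig word) ("", false)).2) := by
    intro l acc
    rw [PySem.List.foldl_append_if
      (fun word => !((pvSigOf words).getD (pvSig word) ("", false)).2) (fun w => w) l acc]
    simp
  have hA : (pvGroupsOf words).items.foldl (fun checked p =>
      p.2.foldl (fun checked word =>
        if pvUniqueIn word p.2 then checked ++ [word] else checked) checked) []
      = (pvGroupsOf words).items.flatMap (fun p => p.2.filter (fun w => pvUniqueIn w p.2)) := by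
    rw [show (fun checked (p : Int × List String) => p.2.foldl (fun checked word =>
          if pvUniqueIn word p.2 then checked ++ [word] else checked) checked)
        = (fun checked p => checked ++ p.2.filter (fun w => pvUniqueIn w p.2))
        from funext fun c => funext fun p => hinnerA p.2 c]
    rw [PySem.List.foldl_append_eq_flatMap]
    simp
  have hB : (pvGroupsOf words).values.foldl (fun out group =>
      group.foldl (fun out word =>
        if !((pvSigOf words).getD (pvSig word) ("", false)).2 then out ++ [word] else out) out) []
      = (pvGroupsOf words).values.flatMap
          (fun g => g.filter (fun w => !((pvSigOf words).getD (pvSig w) ("", false)).2)) := by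
    rw [show (fun out (group : List String) => group.foldl (fun out word =>
          if !((pvSigOf words).getD (pvSig word) ("", false)).2 then out ++ [word] else out) out)
        = (fun out group => out ++ group.filter
            (fun w => !((pvSigOf words).getD (pvSig w) ("", false)).2))
        from funext fun c => funext fun g => hinnerB g c]
    rw [PySem.List.foldl_append_eq_flatMap]
    simp
  show (pvGroupsOf words).items.foldl (fun checked p =>
      p.2.foldl (fun checked word =>
        if pvUniqueIn word p.2 then checked ++ [word] else checked) checked) []
    = (pvGroupsOf words).values.foldl (fun out group =>
      group.foldl (fun out word =>
        if !((pvSigOf words).getD (pvSig word) ("", false)).2 then out ++ [word] else out) out) []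
  rw [hA, hB]
  simp only [PySem.Dict.values,
    PySem.Dict.items_eq_map_keys (pvGroupsOf words) (pv_groups_keys_nodup words) ([] : List String),
    List.flatMap_map, pv_groups_getD]
  congr 1
  funext n
  exact List.filter_congr (fun w hw => pv_cond_eq words n w hw)
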